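-- pv_equiv track=rewrite | github.com/ROOTXBOT2/CODE | 프로그래머스/Lv.0/181918. 배열 만들기 4/배열 만들기 4.py | solution
-- ===== SOURCE A (Python) =====
-- def solution(arr):
--     stk = []
--     i = 0
--     while True:
--         if i < len(arr):
--             if len(stk) == 0:
--                 stk.append(arr[i])
--                 i+=1
--             elif stk[-1] < arr[i]:
--                 stk.append(arr[i])
--                 i+=1
--             elif stk[-1] >= arr[i]:
--                 stk.pop()
--             else:
--                 return -1
--         else:
--             return stk
-- ===== SOURCE B (Python) =====
-- def solution(arr):
--     # Right-to-left pass keeping a running strict minimum: an element survives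
--     # A's push/pop stack exactly when every later element is strictly greater.
--     res = []
--     m = None
--     for x in reversed(arr):
--         if m is None or x < m:
--             res.append(x)
--             m = x
--     res.reverse()
--     return res
-- ===== Notes on version B (the rewrite author's own statement) =====
-- stated objective: faster
-- what changed: Replaced the push/pop increasing-stack simulation (which revisits each index while popping) by a single right-to-left scan with a scalar running minimum that collects the strict suffix minima, then reverses them.
import Mathlib
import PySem

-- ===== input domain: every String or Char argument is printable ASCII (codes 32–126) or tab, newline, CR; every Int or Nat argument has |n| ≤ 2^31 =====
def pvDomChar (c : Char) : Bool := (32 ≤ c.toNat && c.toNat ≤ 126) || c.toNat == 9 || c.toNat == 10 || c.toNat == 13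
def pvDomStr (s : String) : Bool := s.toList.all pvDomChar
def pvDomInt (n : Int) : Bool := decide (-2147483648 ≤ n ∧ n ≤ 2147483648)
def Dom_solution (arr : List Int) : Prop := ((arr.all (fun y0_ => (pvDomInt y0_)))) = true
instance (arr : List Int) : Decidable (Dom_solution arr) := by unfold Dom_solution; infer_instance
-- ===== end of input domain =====

-- B replaces A's push/pop increasing-stack loop by one right-to-left scan with a
-- scalar running minimum (collects the strict suffix minima); objective: faster (constant factor).

-- ===== PORT A =====
-- A's while-loop; stk is held head = top of the Python stack (append = cons, pop = tail,
-- stk[-1] = head), so the returned bottom-to-top list is stk.reverse.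
-- Python's `elif stk[-1] >= arr[i]` is the exact complement of `stk[-1] < arr[i]` on ints,
-- so the trailing `return -1` branch is unreachable and the if/elif becomes if/else.
def loopA (stk rest : List Int) : List Int :=
  match rest with
  | [] => stk.reverse                -- i == len(arr): return stk
  | a :: rs =>
    match stk with
    | [] => loopA [a] rs             -- empty stack: push, i += 1
    | t :: ts =>
      if t < a then loopA (a :: t :: ts) rs   -- stk[-1] < arr[i]: push, i += 1
      else loopA ts (a :: rs)                 -- stk[-1] >= arr[i]: pop, same i
termination_by 2 * rest.length + stk.length
decreasing_by all_goals (simp only [List.length_cons, List.length_nil]; omega)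

def solution (arr : List Int) : List Int := loopA [] arr

-- ===== PORT B =====
-- Source B's loop over reversed(arr): state (res, m); res.append = ++ [x]; final res.reverse().
def altStep (p : List Int × Option Int) (x : Int) : List Int × Option Int :=
  match p.2 with
  | none => (p.1 ++ [x], some x)
  | some m => if x < m then (p.1 ++ [x], some x) else p

def solution_alt (arr : List Int) : List Int :=
  ((arr.reverse.foldl altStep ([], none)).1).reverse

-- ===== PRECONDITION & SPEC =====
def Spec_solution (arr : List Int) (out : List Int) : Prop := out = solution_alt arr
instance (arr : List Int) (out : List Int) : Decidable (Spec_solution arr out) := by unfold Spec_solution; infer_instance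

-- ===== CLAIM (what is proved, stated in full; the proofs are below) =====
def Claim_equal_solution : Prop := ∀ (arr : List Int), Dom_solution arr → Spec_solution arr (solution arr)

-- ===== LEMMAS AND PROOFS =====

-- the common reference function: strict suffix minima, head = overall minimum
def g : List Int → List Int
  | [] => []
  | a :: rs => if a < (g rs).headD (a + 1) then a :: g rs else g rs

theorem g_nil_iff (rs : List Int) : g rs = [] ↔ rs = [] := by
  cases rs with
  | nil => simp [g]
  | cons a t =>
    simp only [g]
    cases hg : g t with
    | nil => simp
    | cons m u => split <;> simp

theorem g_head_min (rs : List Int) (m : Int) (t : List Int) (h : g rs = m :: t) :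
    m ∈ rs ∧ ∀ x ∈ rs, m ≤ x := by
  induction rs generalizing m t with
  | nil => simp [g] at h
  | cons a u ih =>
    simp only [g] at h
    cases hg : g u with
    | nil =>
      have hu : u = [] := (g_nil_iff u).1 hg
      rw [hg] at h
      subst hu
      simp at h
      simp [h.1]
    | cons m' t' =>
      rw [hg] at h
      obtain ⟨hm, hall⟩ := ih m' t' hg
      simp only [List.headD_cons] at h
      split_ifs at h with hlt
      · injection h with h1 h2
        subst h1
        refine ⟨by simp, ?_⟩
        intro x hx
        rcases List.mem_cons.1 hx with rfl | hx
        · exact le_refl x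
        · exact le_of_lt (lt_of_lt_of_le hlt (hall x hx))
      · injection h with h1 h2
        subst h1
        refine ⟨List.mem_cons_of_mem _ hm, ?_⟩
        intro x hx
        rcases List.mem_cons.1 hx with rfl | hx
        · omega
        · exact hall x hx

theorem allLt_iff_head (rs : List Int) (a : Int) :
    (∀ x ∈ rs, a < x) ↔ (∀ m t, g rs = m :: t → a < m) := by
  constructor
  · intro h m t hg
    exact h m (g_head_min rs m t hg).1
  · intro h x hx
    cases hg : g rs with
    | nil => simp [(g_nil_iff rs).1 hg] at hx
    | cons m t =>
      exact lt_of_lt_of_le (h m t hg) ((g_head_min rs m t hg).2 x hx)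

-- g on a cons, decided by "a below everything in rs"
theorem g_cons (a : Int) (rs : List Int) :
    g (a :: rs) = (if ∀ x ∈ rs, a < x then [a] else []) ++ g rs := by
  simp only [g]
  cases hg : g rs with
  | nil =>
    have : rs = [] := (g_nil_iff rs).1 hg
    subst this; simp
  | cons m t =>
    simp only [List.headD_cons]
    by_cases hall : ∀ x ∈ rs, a < x
    · have ham : a < m := (allLt_iff_head rs a).1 hall m t hg
      rw [if_pos ham, if_pos hall]
      simp
    · have ham : ¬ a < m := by
        intro hlt
        exact hall fun x hx => lt_of_lt_of_le hlt ((g_head_min rs m t hg).2 x hx)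
      rw [if_neg ham, if_neg hall]
      simp

-- ===== A side =====

theorem loopA_eq (stk rest : List Int) (hsd : List.Pairwise (· > ·) stk) :
    loopA stk rest = (stk.filter (fun s => decide (∀ x ∈ rest, s < x))).reverse ++ g rest := by
  induction stk, rest using loopA.induct with
  | case1 stk =>
    simp [loopA, g]
  | case2 a rs ih =>
    rw [loopA, ih (by simp), g_cons]
    by_cases h : ∀ x ∈ rs, a < x
    · have hd : decide (∀ x ∈ rs, a < x) = true := decide_eq_true h
      simp [hd, if_pos h]
    · have hd : decide (∀ x ∈ rs, a < x) = false := decide_eq_false h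
      simp [hd, if_neg h]
  | case3 a rs t ts hlt ih =>
    rw [loopA, if_pos hlt]
    have hts : ∀ s ∈ ts, t > s := fun s hs => (List.pairwise_cons.1 hsd).1 s hs
    have hpd : List.Pairwise (· > ·) (a :: t :: ts) := by
      refine List.pairwise_cons.2 ⟨?_, hsd⟩
      intro s hs
      rcases List.mem_cons.1 hs with rfl | hs
      · exact hlt
      · exact lt_trans (hts s hs) hlt
    rw [ih hpd, g_cons]
    -- each stack element s satisfies s < a, so `s < everything in a::rs ↔ s < everything in rs`
    have hfilt : ∀ s ∈ (t :: ts),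
        (decide (∀ x ∈ rs, s < x)) = (decide (∀ x ∈ a :: rs, s < x)) := by
      intro s hs
      have hsa : s < a := by
        rcases List.mem_cons.1 hs with rfl | hs
        · exact hlt
        · exact lt_trans (hts s hs) hlt
      have : (∀ x ∈ rs, s < x) ↔ (∀ x ∈ a :: rs, s < x) := by
        constructor
        · intro h x hx
          rcases List.mem_cons.1 hx with rfl | hx
          · exact hsa
          · exact h x hx
        · intro h x hx
          exact h x (List.mem_cons_of_mem _ hx)
      exact decide_eq_decide.2 this
    rw [List.filter_cons, List.filter_congr hfilt]
    by_cases ha : ∀ x ∈ rs, a < x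
    · rw [if_pos (by simpa using ha), if_pos ha]
      simp only [List.reverse_cons, List.append_assoc, List.singleton_append]
    · rw [if_neg (by simpa using ha), if_neg ha]
      simp only [List.nil_append]
  | case4 a rs t ts hnlt ih =>
    rw [loopA, if_neg hnlt, ih (List.pairwise_cons.1 hsd).2, List.filter_cons]
    have hfalse : (decide (∀ x ∈ a :: rs, t < x)) = false := by
      simp only [decide_eq_false_iff_not]
      intro h
      exact hnlt (h a List.mem_cons_self)
    rw [hfalse]
    simp

theorem solution_eq_g (arr : List Int) : solution arr = g arr := by
  rw [solution, loopA_eq [] arr (by simp)]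
  simp

-- ===== B side =====

theorem alt_fold (rs : List Int) :
    rs.reverse.foldl altStep ([], none) = ((g rs).reverse, (g rs).head?) := by
  induction rs with
  | nil => simp [g]
  | cons a t ih =>
    rw [List.reverse_cons, List.foldl_append, ih, List.foldl_cons, List.foldl_nil]
    rw [g_cons]
    cases hg : g t with
    | nil =>
      simp [altStep, (g_nil_iff t).1 hg]
    | cons m u =>
      simp only [altStep, List.head?_cons]
      by_cases hall : ∀ x ∈ t, a < x
      · have ham : a < m := (allLt_iff_head t a).1 hall m u hg
        rw [if_pos ham, if_pos hall]
        simp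
      · have ham : ¬ a < m := by
          intro hlt
          exact hall fun x hx => lt_of_lt_of_le hlt ((g_head_min t m u hg).2 x hx)
        rw [if_neg ham, if_neg hall]
        simp

theorem alt_eq_g (arr : List Int) : solution_alt arr = g arr := by
  rw [solution_alt, alt_fold]
  simp

-- ===== VERDICT (by name: the statement is the Claim_ definition above) =====
theorem solution_spec : Claim_equal_solution := by
  intro arr _
  unfold Spec_solution
  rw [solution_eq_g, alt_eq_g]
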